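-- pv_equiv track=rewrite | github.com/NagasakaH/devcontainer | skills/orchestration-init/scripts/cleanup.py | parse_array_response
-- ===== SOURCE A (Python) =====
-- def parse_array_response(response: str) -> list[str]:
--     """Redis配列レスポンスをパース"""
--     if response == "*0":
--         return []
--
--     lines = response.split("\r\n")
--     result = []
--     i = 0
--     while i < len(lines):
--         line = lines[i]
--         if line.startswith("$"):
--             # 次の行がデータ
--             if i + 1 < len(lines):
--                 result.append(lines[i + 1])
--                 i += 2
--             else:
--                 i += 1
--         else:
--             i += 1
--     return result
-- ===== SOURCE B (Python) =====
-- def parse_array_response(response: str) -> list[str]: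
--     """Redis配列レスポンスをパース"""
--
--     def after_marker(lines: list[str]) -> list[str]:
--         """Drop everything up to and including the first dollar-marker line."""
--         for idx, line in enumerate(lines):
--             if line.startswith("$"):
--                 return lines[idx + 1:]
--         return []
--
--     out = []
--     rest = after_marker(response.split("\r\n"))
--     while rest:
--         out.append(rest[0])
--         rest = after_marker(rest[1:])
--     return out
-- ===== Notes on version B (the rewrite author's own statement) =====
-- stated objective: alternative
-- what changed: Replaces A's single index-driven while loop (i += 2 skipping, plus a redundant *0 guard) by a two-level decomposition: a helper that searches for the next dollar-marker line and slices the list just past it, and an outer loop that repeatedly takes the head of that slice as data.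
import Mathlib
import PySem

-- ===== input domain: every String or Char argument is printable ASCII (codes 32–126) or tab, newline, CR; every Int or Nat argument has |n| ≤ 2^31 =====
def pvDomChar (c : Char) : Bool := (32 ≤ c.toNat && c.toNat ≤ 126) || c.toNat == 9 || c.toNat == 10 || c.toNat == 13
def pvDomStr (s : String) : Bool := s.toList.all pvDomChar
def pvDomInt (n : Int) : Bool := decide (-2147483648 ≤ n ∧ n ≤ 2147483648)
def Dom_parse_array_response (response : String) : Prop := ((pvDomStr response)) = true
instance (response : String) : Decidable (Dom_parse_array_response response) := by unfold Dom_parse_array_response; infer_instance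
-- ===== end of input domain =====

-- B replaces A's index-driven while loop (i += 2) and its redundant *0 guard by a
-- search-and-slice decomposition: drop through the next dollar-marker line, take the head
-- as data, repeat (objective: alternative, same cost).


-- ===== PORT A =====
-- A's while loop over index i: at a "$" line consume the NEXT line as data (i += 2),
-- else i += 1; modelled as structural recursion on the suffix of lines starting at i
def parseLoopA : List String → List String
  | [] => []
  | l :: rest =>
    if PySem.Str.startswith l "$" then
      match rest with
      | [] => []                           -- i + 1 < len fails: i += 1, loop ends
      | d :: rest2 => d :: parseLoopA rest2 -- append lines[i+1], i += 2
    else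
      parseLoopA rest                      -- i += 1

def parse_array_response (response : String) : List String :=
  if response = "*0" then []
  else parseLoopA ((PySem.Str.split? response "\r\n").getD [])

-- ===== PORT B =====
-- after_marker: drop everything up to and including the first dollar-marker line
def afterMarker : List String → List String
  | [] => []
  | l :: rest => if PySem.Str.startswith l "$" then rest else afterMarker rest

theorem afterMarker_length_le : ∀ (xs : List String), (afterMarker xs).length ≤ xs.length
  | [] => le_refl _
  | l :: rest => by
    by_cases h : PySem.Chars.startswith l.toList ['$'] = true
    · simp [afterMarker, PySem.Str.startswith, h]
    · simp [afterMarker, PySem.Str.startswith, h]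
      exact le_trans (afterMarker_length_le rest) (Nat.le_succ _)

-- the outer while loop: take the head of the slice as data, search again past it
def collectB : List String → List String
  | [] => []
  | d :: rest => d :: collectB (afterMarker rest)
termination_by xs => xs.length
decreasing_by
  exact Nat.lt_succ_of_le (afterMarker_length_le rest)

def parse_array_response_alt (response : String) : List String :=
  collectB (afterMarker ((PySem.Str.split? response "\r\n").getD []))

-- ===== PRECONDITION & SPEC =====
def Spec_parse_array_response (response : String) (out : List String) : Prop := out = parse_array_response_alt response
instance (response : String) (out : List String) : Decidable (Spec_parse_array_response response out) := by unfold Spec_parse_array_response; infer_instance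

-- ===== CLAIM (what is proved, stated in full; the proofs are below) =====
def Claim_equal_parse_array_response : Prop := ∀ (response : String), Dom_parse_array_response response → Spec_parse_array_response response (parse_array_response response)

-- ===== LEMMAS AND PROOFS =====
theorem dollar_toList : "$".toList = ['$'] := rfl

theorem loopA_eq_collectB : ∀ (xs : List String), parseLoopA xs = collectB (afterMarker xs)
  | [] => by simp [parseLoopA, afterMarker, collectB]
  | l :: rest => by
    by_cases h : PySem.Chars.startswith l.toList ['$'] = true
    · cases rest with
      | nil => simp [parseLoopA, afterMarker, collectB, PySem.Str.startswith, h]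
      | cons d rest2 =>
        simp only [parseLoopA, afterMarker, PySem.Str.startswith, dollar_toList, h, if_true, collectB]
        exact congrArg (d :: ·) (loopA_eq_collectB rest2)
    · cases rest with
      | nil => simp [parseLoopA, afterMarker, PySem.Str.startswith, collectB, h]
      | cons d rest2 =>
        simpa [parseLoopA, afterMarker, PySem.Str.startswith, h] using loopA_eq_collectB (d :: rest2)

-- ===== VERDICT (by name: the statement is the Claim_ definition above) =====
theorem parse_array_response_spec : Claim_equal_parse_array_response := by
  intro response _
  unfold Spec_parse_array_response parse_array_response parse_array_response_alt
  by_cases h : response = "*0"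
  · subst h
    have h1 : afterMarker ((PySem.Str.split? "*0" "\r\n").getD []) = [] := by decide
    simp [h1, collectB]
  · simp [h, loopA_eq_collectB]
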